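-- pv_equiv track=rewrite | github.com/kkorsy/BMSTU-5sem-AA | lab_3/sort.py | heap_division
-- ===== SOURCE A (Python) =====
-- def count_indexes(i, indexes):
--     indexes.append(2 * indexes[i] + 1)
--     indexes.append(2 * indexes[i] + 2)
--
-- def get_list(index_list, heap):
--     return [heap[i] for i in index_list if i < len(heap)]
--
-- def heap_division(heap):
--     index = 0
--     indexes_left = [1]
--     indexes_right = [2]
--     while indexes_left[-1] < len(heap):
--         count_indexes(index, indexes_left)
--         count_indexes(index, indexes_right)
--         index += 1
--     heap_left = get_list(indexes_left, heap)
--     heap_right = get_list(indexes_right, heap)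
--     return heap_left, heap_right
-- ===== SOURCE B (Python) =====
-- def heap_division(heap):
--     heap_left = []
--     heap_right = []
--     for i in range(1, len(heap)):
--         a = i
--         while a > 2:
--             a = (a - 1) // 2
--         if a == 1:
--             heap_left.append(heap[i])
--         else:
--             heap_right.append(heap[i])
--     return heap_left, heap_right
-- ===== Notes on version B (the rewrite author's own statement) =====
-- stated objective: simpler
-- what changed: Replaces A's BFS index-list generation (growing left/right index lists level by level, then filtering and indexing the heap) with a single ascending pass over indices 1..len(heap)-1 that classifies each index by climbing parent links (i-1)//2 until reaching root child 1 or 2.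
import Mathlib
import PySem

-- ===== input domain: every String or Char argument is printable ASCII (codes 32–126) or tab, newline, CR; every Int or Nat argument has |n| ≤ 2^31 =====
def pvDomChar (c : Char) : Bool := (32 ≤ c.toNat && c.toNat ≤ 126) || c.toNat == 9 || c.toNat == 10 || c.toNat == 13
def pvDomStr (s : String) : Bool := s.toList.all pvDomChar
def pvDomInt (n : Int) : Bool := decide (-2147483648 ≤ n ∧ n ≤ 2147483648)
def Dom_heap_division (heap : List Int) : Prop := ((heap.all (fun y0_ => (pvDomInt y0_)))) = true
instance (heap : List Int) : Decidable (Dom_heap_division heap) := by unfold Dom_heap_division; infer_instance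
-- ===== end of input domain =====

-- B replaces A's level-by-level BFS index-list construction with one ascending pass that
-- classifies each heap index by climbing parent links; objective: simpler (not faster).

-- ===== PORT A =====
-- count_indexes(i, indexes): appends 2*indexes[i]+1 then 2*indexes[i]+2 (the second read
-- sees the grown list, as in Python; i is always in range here, so pyGetD's default is never used)
def count_indexes (i : Int) (indexes : List Int) : List Int :=
  let indexes := indexes ++ [2 * PySem.List.pyGetD indexes i 0 + 1]
  indexes ++ [2 * PySem.List.pyGetD indexes i 0 + 2]

-- get_list(index_list, heap): [heap[i] for i in index_list if i < len(heap)]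
-- (every generated index is ≥ 1, so heap[i] never raises and pyGetD's default is never used)
def get_list (index_list : List Int) (heap : List Int) : List Int :=
  (index_list.filter (fun i => decide (i < (heap.length : Int)))).map
    (fun i => PySem.List.pyGetD heap i 0)

-- the while loop; indexes_left[-1] via pyGetD (the list is never empty).
-- fuel = heap.length + 1 provably suffices (loop lemma below): the loop runs at most
-- ⌈len/2⌉ + 1 times since the last left index after k iterations is ≥ 2k.
def heap_division_loop (heap : List Int) : Nat → Int → List Int → List Int → List Int × List Int
  | 0, _, il, ir => (il, ir)
  | fuel + 1, index, il, ir =>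
    if PySem.List.pyGetD il (-1) 0 < (heap.length : Int) then
      heap_division_loop heap fuel (index + 1) (count_indexes index il) (count_indexes index ir)
    else (il, ir)

def heap_division (heap : List Int) : List Int × List Int :=
  let p := heap_division_loop heap (heap.length + 1) 0 [1] [2]
  (get_list p.1 heap, get_list p.2 heap)

-- ===== PORT B =====
-- termination measure lemma for hd_climb (cited by name in its decreasing_by)
theorem hd_climb_dec {a : Int} (h : 2 < a) :
    (PySem.Int.floordiv (a - 1) 2).toNat < a.toNat := by
  rw [PySem.Int.floordiv_eq_ediv_of_pos (by omega : (0:Int) < 2)]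
  omega

-- the inner while loop of Source B: climb parents until a ≤ 2
def hd_climb (a : Int) : Int :=
  if h : 2 < a then hd_climb (PySem.Int.floordiv (a - 1) 2) else a
termination_by a.toNat
decreasing_by exact hd_climb_dec h

def heap_division_alt (heap : List Int) : List Int × List Int :=
  (PySem.List.pyRange 1 (heap.length : Int) 1).foldl
    (fun acc i =>
      let a := hd_climb i
      if a = 1 then (acc.1 ++ [PySem.List.pyGetD heap i 0], acc.2)
      else (acc.1, acc.2 ++ [PySem.List.pyGetD heap i 0]))
    ([], [])

-- ===== PRECONDITION & SPEC =====
def Spec_heap_division (heap : List Int) (out : List Int × List Int) : Prop := out = heap_division_alt heap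
instance (heap : List Int) (out : List Int × List Int) : Decidable (Spec_heap_division heap out) := by unfold Spec_heap_division; infer_instance

-- ===== CLAIM (what is proved, stated in full; the proofs are below) =====
def Claim_equal_heap_division : Prop := ∀ (heap : List Int), Dom_heap_division heap → Spec_heap_division heap (heap_division heap)

-- ===== LEMMAS AND PROOFS =====

-- BFS order of the subtree rooted at r (r = 1: left, r = 2: right):
-- seqT r 0 = r, seqT r (2k+1) = 2*(seqT r k)+1, seqT r (2k+2) = 2*(seqT r k)+2.
def seqT (r : Int) : Nat → Int
  | 0 => r
  | j + 1 => 2 * seqT r (j / 2) + (if j % 2 = 0 then 1 else 2)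
decreasing_by omega

def mapT (r : Int) (m : Nat) : List Int := (List.range m).map (seqT r)

theorem seqT_odd (r : Int) (k : Nat) : seqT r (2 * k + 1) = 2 * seqT r k + 1 := by
  rw [seqT]
  norm_num

theorem seqT_even (r : Int) (k : Nat) : seqT r (2 * k + 2) = 2 * seqT r k + 2 := by
  rw [show 2 * k + 2 = (2 * k + 1) + 1 from rfl, seqT]
  have h1 : (2 * k + 1) / 2 = k := by omega
  have h2 : (2 * k + 1) % 2 = 1 := by omega
  rw [h1, h2]
  norm_num

theorem seqT_lt_succ {r : Int} (hr : 1 ≤ r) : ∀ j, seqT r j < seqT r (j + 1) := by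
  intro j
  induction j using Nat.strong_induction_on with
  | _ j ih =>
    rcases Nat.even_or_odd j with ⟨k, hk⟩ | ⟨k, hk⟩
    · cases k with
      | zero =>
        have : j = 0 := by omega
        subst this
        have h1 := seqT_odd r 0
        simp [seqT] at h1 ⊢
        omega
      | succ k' =>
        have hj : j = 2 * k' + 2 := by omega
        subst hj
        have h1 := seqT_even r k'
        have h2 := seqT_odd r (k' + 1)
        have h3 : seqT r k' < seqT r (k' + 1) := ih k' (by omega)
        rw [show 2 * k' + 2 + 1 = 2 * (k' + 1) + 1 from by ring] 
        omega
    · have hj : j = 2 * k + 1 := by omega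
      subst hj
      have h1 := seqT_odd r k
      have h2 := seqT_even r k
      rw [show 2 * k + 1 + 1 = 2 * k + 2 from rfl]
      omega

theorem seqT_strictMono {r : Int} (hr : 1 ≤ r) : StrictMono (seqT r) :=
  strictMono_nat_of_lt_succ (seqT_lt_succ hr)

theorem seqT_ge {r : Int} (hr : 1 ≤ r) : ∀ j : Nat, ((j : Nat) : Int) + r ≤ seqT r j := by
  intro j
  induction j with
  | zero => simp [seqT]
  | succ j ih =>
    have := seqT_lt_succ hr j
    push_cast
    omega

theorem seqT_mono_r {r r' : Int} (h : r ≤ r') : ∀ j, seqT r j ≤ seqT r' j := by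
  intro j
  induction j using Nat.strong_induction_on with
  | _ j ih =>
    cases j with
    | zero => simpa [seqT] using h
    | succ j =>
      rw [seqT, seqT]
      have := ih (j / 2) (by omega)
      by_cases hm : j % 2 = 0 <;> simp [hm] <;> omega

theorem hd_climb_le_two {a : Int} (h : a ≤ 2) : hd_climb a = a := by
  rw [hd_climb, dif_neg (by omega)]

theorem hd_climb_odd {x : Int} (h : 1 ≤ x) : hd_climb (2 * x + 1) = hd_climb x := by
  rw [hd_climb, dif_pos (by omega)]
  congr 1
  rw [PySem.Int.floordiv_eq_ediv_of_pos (by omega : (0:Int) < 2)]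
  omega

theorem hd_climb_even {x : Int} (h : 1 ≤ x) : hd_climb (2 * x + 2) = hd_climb x := by
  rw [hd_climb, dif_pos (by omega)]
  congr 1
  rw [PySem.Int.floordiv_eq_ediv_of_pos (by omega : (0:Int) < 2)]
  omega

theorem climb_seqT {r : Int} (hr1 : 1 ≤ r) (hr2 : r ≤ 2) : ∀ j, hd_climb (seqT r j) = r := by
  intro j
  induction j using Nat.strong_induction_on with
  | _ j ih =>
    cases j with
    | zero => simpa [seqT] using hd_climb_le_two hr2
    | succ j =>
      have hx : 1 ≤ seqT r (j / 2) := by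
        have := seqT_ge hr1 (j / 2)
        omega
      rcases Nat.even_or_odd j with ⟨k, hk⟩ | ⟨k, hk⟩
      · have hj : j + 1 = 2 * k + 1 := by omega
        have hk2 : k = j / 2 := by omega
        rw [hj, seqT_odd, hk2, hd_climb_odd hx]
        exact ih (j / 2) (by omega)
      · have hj : j + 1 = 2 * k + 2 := by omega
        have hk2 : k = j / 2 := by omega
        rw [hj, seqT_even, hk2, hd_climb_even hx]
        exact ih (j / 2) (by omega)

theorem climb_cases_aux : ∀ n : Nat, ∀ a : Int, a.toNat = n → 1 ≤ a →
    (hd_climb a = 1 ∨ hd_climb a = 2) ∧ ∃ j, seqT (hd_climb a) j = a := by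
  intro n
  induction n using Nat.strong_induction_on with
  | _ n ih =>
    intro a hn ha
    by_cases h2 : 2 < a
    · set p : Int := PySem.Int.floordiv (a - 1) 2 with hp
      have hpe : p = (a - 1) / 2 := by
        rw [hp, PySem.Int.floordiv_eq_ediv_of_pos (by omega : (0:Int) < 2)]
      have hp1 : 1 ≤ p := by omega
      have hpn : p.toNat < n := by omega
      have hcl : hd_climb a = hd_climb p := by rw [hd_climb, dif_pos h2]
      obtain ⟨hor, j, hj⟩ := ih p.toNat hpn p rfl hp1
      refine ⟨hcl ▸ hor, ?_⟩
      rcases (by omega : a = 2 * p + 1 ∨ a = 2 * p + 2) with he | he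
      · exact ⟨2 * j + 1, by rw [hcl, seqT_odd, hj, he]⟩
      · exact ⟨2 * j + 2, by rw [hcl, seqT_even, hj, he]⟩
    · rw [hd_climb_le_two (by omega)]
      refine ⟨by omega, 0, ?_⟩
      simp [seqT]

theorem climb_cases {a : Int} (h : 1 ≤ a) : hd_climb a = 1 ∨ hd_climb a = 2 :=
  (climb_cases_aux a.toNat a rfl h).1

theorem climb_surj {a : Int} (h : 1 ≤ a) : ∃ j, seqT (hd_climb a) j = a :=
  (climb_cases_aux a.toNat a rfl h).2

theorem mapT_succ (r : Int) (m : Nat) : mapT r (m + 1) = mapT r m ++ [seqT r m] := by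
  simp [mapT, List.range_succ]

theorem getD_mapT {r : Int} {k m : Nat} (h : k < m) :
    PySem.List.pyGetD (mapT r m) ((k : Nat) : Int) 0 = seqT r k := by
  rw [PySem.List.pyGetD_natCast, mapT]
  rw [List.getD_eq_getElem?_getD, List.getElem?_map, List.getElem?_range h]
  rfl

theorem count_mapT (r : Int) (k : Nat) :
    count_indexes ((k : Nat) : Int) (mapT r (2 * k + 1)) = mapT r (2 * k + 3) := by
  have h1 : PySem.List.pyGetD (mapT r (2 * k + 1)) ((k : Nat) : Int) 0 = seqT r k :=
    getD_mapT (by omega)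
  have h2 : mapT r (2 * k + 1) ++ [2 * seqT r k + 1] = mapT r (2 * k + 2) := by
    have h := mapT_succ r (2 * k + 1)
    rw [seqT_odd] at h
    rw [show 2 * k + 2 = 2 * k + 1 + 1 from rfl, h]
  have h3 : PySem.List.pyGetD (mapT r (2 * k + 2)) ((k : Nat) : Int) 0 = seqT r k :=
    getD_mapT (by omega)
  have h4 : mapT r (2 * k + 2) ++ [2 * seqT r k + 2] = mapT r (2 * k + 3) := by
    have h := mapT_succ r (2 * k + 2)
    rw [seqT_even] at h
    rw [show 2 * k + 3 = 2 * k + 2 + 1 from rfl, h]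
  unfold count_indexes
  dsimp only
  rw [h1, h2, h3, h4]

theorem loop_result (heap : List Int) : ∀ fuel k : Nat, heap.length ≤ fuel + 2 * k →
    ∃ m : Nat, 2 * k < m ∧
      heap_division_loop heap fuel ((k : Nat) : Int) (mapT 1 (2 * k + 1)) (mapT 2 (2 * k + 1))
        = (mapT 1 m, mapT 2 m) ∧
      ∀ j, m ≤ j → (heap.length : Int) ≤ seqT 1 j ∧ (heap.length : Int) ≤ seqT 2 j := by
  intro fuel
  induction fuel with
  | zero =>
    intro k hk
    refine ⟨2 * k + 1, by omega, rfl, ?_⟩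
    intro j hj
    have g1 := seqT_ge (by omega : (1:Int) ≤ 1) j
    have g2 := seqT_ge (by omega : (1:Int) ≤ 2) j
    omega
  | succ fuel ih =>
    intro k hk
    have hlast : PySem.List.pyGetD (mapT 1 (2 * k + 1)) (-1) 0 = seqT 1 (2 * k) := by
      rw [show 2 * k + 1 = (2 * k) + 1 from rfl, mapT_succ]
      exact PySem.List.pyGetD_neg_one_append_singleton _ _ _
    rw [heap_division_loop, hlast]
    by_cases hc : seqT 1 (2 * k) < (heap.length : Int)
    · rw [if_pos hc, count_mapT, count_mapT]
      have hcast : ((k : Nat) : Int) + 1 = (((k + 1 : Nat)) : Int) := by push_cast; ring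
      have hidx : 2 * k + 3 = 2 * (k + 1) + 1 := by ring
      rw [hcast, hidx]
      obtain ⟨m, hm1, hm2, hm3⟩ := ih (k + 1) (by omega)
      exact ⟨m, by omega, hm2, hm3⟩
    · rw [if_neg hc]
      refine ⟨2 * k + 1, by omega, rfl, ?_⟩
      intro j hj
      have mono := (seqT_strictMono (by omega : (1:Int) ≤ 1)).monotone (show 2 * k ≤ j by omega)
      have hr := seqT_mono_r (by omega : (1:Int) ≤ 2) j
      omega

theorem filter_mapT {r : Int} (hr1 : 1 ≤ r) (hr2 : r ≤ 2) (n : Int) (m : Nat)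
    (hm : ∀ j, m ≤ j → n ≤ seqT r j) :
    (mapT r m).filter (fun i => decide (i < n))
      = (PySem.List.pyRange 1 n 1).filter (fun i => decide (hd_climb i = r)) := by
  have pw1 : ((mapT r m).filter (fun i => decide (i < n))).Pairwise (· < ·) := by
    refine List.Pairwise.filter _ ?_
    exact List.Pairwise.map _ (fun a b h => seqT_strictMono hr1 h) List.pairwise_lt_range
  have pw2 : ((PySem.List.pyRange 1 n 1).filter (fun i => decide (hd_climb i = r))).Pairwise (· < ·) :=
    List.Pairwise.filter _ (PySem.List.pairwise_lt_pyRange_one 1 n)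
  have nd1 := pw1.imp (fun h => LT.lt.ne h)
  have nd2 := pw2.imp (fun h => LT.lt.ne h)
  refine List.Perm.eq_of_pairwise' pw1 pw2 ((List.perm_ext_iff_of_nodup nd1 nd2).mpr ?_)
  intro x
  simp only [List.mem_filter, mapT, List.mem_map, List.mem_range, decide_eq_true_eq,
    PySem.List.mem_pyRange_one]
  constructor
  · rintro ⟨⟨j, hj, rfl⟩, hlt⟩
    have := seqT_ge hr1 j
    exact ⟨⟨by omega, hlt⟩, climb_seqT hr1 hr2 j⟩
  · rintro ⟨⟨hx1, hx2⟩, hcl⟩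
    obtain ⟨j, hj⟩ := climb_surj hx1
    rw [hcl] at hj
    refine ⟨⟨j, ?_, hj⟩, hx2⟩
    by_contra hge
    have := hm j (by omega)
    omega

theorem foldl_split (heap : List Int) : ∀ (xs l r : List Int),
    xs.foldl
      (fun acc i =>
        let a := hd_climb i
        if a = 1 then (acc.1 ++ [PySem.List.pyGetD heap i 0], acc.2)
        else (acc.1, acc.2 ++ [PySem.List.pyGetD heap i 0]))
      (l, r)
    = (l ++ (xs.filter (fun i => decide (hd_climb i = 1))).map (fun i => PySem.List.pyGetD heap i 0),
       r ++ (xs.filter (fun i => !decide (hd_climb i = 1))).map (fun i => PySem.List.pyGetD heap i 0)) := by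
  intro xs
  induction xs with
  | nil => simp
  | cons x xs ih =>
    intro l r
    by_cases hx : hd_climb x = 1
    · simp only [List.foldl_cons, List.filter_cons, hx, decide_true, Bool.not_true, if_true,
        List.map_cons, ih]
      simp
    · simp only [List.foldl_cons, List.filter_cons, hx, decide_false, Bool.not_false, if_false, ih]
      simp

theorem filter_not_one (n : Int) :
    (PySem.List.pyRange 1 n 1).filter (fun i => !decide (hd_climb i = 1))
      = (PySem.List.pyRange 1 n 1).filter (fun i => decide (hd_climb i = 2)) := by
  apply List.filter_congr
  intro x hx
  rw [PySem.List.mem_pyRange_one] at hx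
  rcases climb_cases hx.1 with h | h <;> simp [h]

-- ===== VERDICT (by name: the statement is the Claim_ definition above) =====
theorem heap_division_spec : Claim_equal_heap_division := by
  intro heap _
  unfold Spec_heap_division
  obtain ⟨m, hm1, hm2, hm3⟩ := loop_result heap (heap.length + 1) 0 (by omega)
  have h1 : mapT 1 (2 * 0 + 1) = ([1] : List Int) := by simp [mapT, seqT]
  have h2 : mapT 2 (2 * 0 + 1) = ([2] : List Int) := by simp [mapT, seqT]
  rw [h1, h2] at hm2
  have hA : heap_division heap = (get_list (mapT 1 m) heap, get_list (mapT 2 m) heap) := by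
    unfold heap_division
    dsimp only
    rw [show (0 : Int) = ((0 : Nat) : Int) from rfl, hm2]
  have hB : heap_division_alt heap
      = (((PySem.List.pyRange 1 (heap.length : Int) 1).filter
            (fun i => decide (hd_climb i = 1))).map (fun i => PySem.List.pyGetD heap i 0),
         ((PySem.List.pyRange 1 (heap.length : Int) 1).filter
            (fun i => !decide (hd_climb i = 1))).map (fun i => PySem.List.pyGetD heap i 0)) := by
    have h := foldl_split heap (PySem.List.pyRange 1 (heap.length : Int) 1) [] []
    rw [List.nil_append, List.nil_append] at h
    exact h
  rw [hA, hB]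
  unfold get_list
  rw [filter_mapT (r := 1) (by omega) (by omega) (heap.length : Int) m (fun j hj => (hm3 j hj).1),
    filter_mapT (r := 2) (by omega) (by omega) (heap.length : Int) m (fun j hj => (hm3 j hj).2),
    filter_not_one]
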